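-- pv_equiv track=rewrite | github.com/ValentinAvram/University | Metaheuristicas-Eng/Practice3/MapExploration.py | calcPosition
-- ===== SOURCE A (Python) =====
-- def calcPosition(vector):
--     position = [0, 0]
--     for i in range(len(vector)):
--         if vector[i] == 0:
--             position[1] += 1
--         elif vector[i] == 1:
--             position[1] -= 1
--         elif vector[i] == 2:
--             position[0] += 1
--         elif vector[i] == 3:
--             position[0] -= 1
--     return position
-- ===== SOURCE B (Python) =====
-- def calcPosition(vector):
--     counts = {}
--     for v in vector:
--         counts[v] = counts.get(v, 0) + 1
--     return [counts.get(2, 0) - counts.get(3, 0), counts.get(0, 0) - counts.get(1, 0)]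
-- ===== Notes on version B (the rewrite author's own statement) =====
-- stated objective: simpler
-- what changed: Replaced the branch-per-element coordinate accumulation with a two-phase count-then-arithmetic decomposition: one pass builds a frequency dict, then the result is computed from four lookups.
import Mathlib
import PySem

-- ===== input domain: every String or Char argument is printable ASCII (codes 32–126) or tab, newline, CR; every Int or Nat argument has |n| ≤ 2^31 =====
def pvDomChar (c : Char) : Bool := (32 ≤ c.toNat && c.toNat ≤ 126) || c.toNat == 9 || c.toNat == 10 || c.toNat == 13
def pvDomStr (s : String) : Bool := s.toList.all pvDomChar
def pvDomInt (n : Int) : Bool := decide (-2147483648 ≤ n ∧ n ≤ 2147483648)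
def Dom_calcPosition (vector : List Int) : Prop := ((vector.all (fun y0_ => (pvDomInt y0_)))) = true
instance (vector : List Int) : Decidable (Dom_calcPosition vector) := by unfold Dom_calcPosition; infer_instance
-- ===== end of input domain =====

-- B replaces A's branch-per-element accumulation with a count-first, arithmetic-second decomposition (simpler).

-- ===== PORT A =====
-- A: position = [0,0]; one branchy pass updating the coordinates.
def calcPosition (vector : List Int) : List Int :=
  let position :=
    vector.foldl (fun (p : Int × Int) v =>
      if v = 0 then (p.1, p.2 + 1)
      else if v = 1 then (p.1, p.2 - 1)
      else if v = 2 then (p.1 + 1, p.2)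
      else if v = 3 then (p.1 - 1, p.2)
      else p) (0, 0)
  [position.1, position.2]

-- ===== PORT B =====
-- B: build a frequency dict, then four lookups.
def calcPosition_alt (vector : List Int) : List Int :=
  let counts : PySem.Dict Int Int :=
    vector.foldl (fun d v => d.insert v (d.getD v 0 + 1)) PySem.Dict.empty
  [counts.getD 2 0 - counts.getD 3 0, counts.getD 0 0 - counts.getD 1 0]

-- ===== PRECONDITION & SPEC =====
def Spec_calcPosition (vector : List Int) (out : List Int) : Prop := out = calcPosition_alt vector
instance (vector : List Int) (out : List Int) : Decidable (Spec_calcPosition vector out) := by unfold Spec_calcPosition; infer_instance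

-- ===== CLAIM (what is proved, stated in full; the proofs are below) =====
def Claim_equal_calcPosition : Prop := ∀ (vector : List Int), Dom_calcPosition vector → Spec_calcPosition vector (calcPosition vector)

-- ===== LEMMAS AND PROOFS =====
theorem calcPosition_foldl_counts (l : List Int) (a b : Int) :
    l.foldl (fun (p : Int × Int) v =>
      if v = 0 then (p.1, p.2 + 1)
      else if v = 1 then (p.1, p.2 - 1)
      else if v = 2 then (p.1 + 1, p.2)
      else if v = 3 then (p.1 - 1, p.2)
      else p) (a, b)
    = (a + l.count 2 - l.count 3, b + l.count 0 - l.count 1) := by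
  induction l generalizing a b with
  | nil => simp
  | cons x xs ih =>
    by_cases h0 : x = 0 <;> by_cases h1 : x = 1 <;> by_cases h2 : x = 2 <;> by_cases h3 : x = 3 <;>
      simp_all [List.count_cons, ih] <;> omega

-- ===== VERDICT (by name: the statement is the Claim_ definition above) =====
theorem calcPosition_spec : Claim_equal_calcPosition := by
  intro vector _
  unfold Spec_calcPosition calcPosition calcPosition_alt
  simp [calcPosition_foldl_counts, PySem.Dict.getD_foldl_insert_add_one]
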